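-- pv_equiv track=rewrite | github.com/saidulIslam1602/Transaction-Anomaly-Detection | src/services/merchant_services.py | _suggest_verifications
-- ===== SOURCE A (Python) =====
-- from typing import Dict, List, Tuple, Optional, Any
--
-- def _suggest_verifications(risk_factors: List[str]) -> List[str]:
--     """Suggest additional verifications based on risk factors."""
--     verifications = []
--
--     if any('ownership' in factor.lower() for factor in risk_factors):
--         verifications.append("Enhanced ownership verification")
--
--     if any('registered' in factor.lower() for factor in risk_factors):
--         verifications.append("Business registration verification")
--
--     if any('industry' in factor.lower() for factor in risk_factors):
--         verifications.append("Industry-specific compliance checks")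
--
--     if any('country' in factor.lower() for factor in risk_factors):
--         verifications.append("Enhanced due diligence for jurisdiction")
--
--     return verifications
-- ===== SOURCE B (Python) =====
-- def _suggest_verifications(risk_factors):
--     """Suggest additional verifications based on risk factors."""
--     table = [
--         ("ownership", "Enhanced ownership verification"),
--         ("registered", "Business registration verification"),
--         ("industry", "Industry-specific compliance checks"),
--         ("country", "Enhanced due diligence for jurisdiction"),
--     ]
--     present = set()
--     for factor in risk_factors:
--         low = factor.lower()
--         for kw, _ in table:
--             if kw in low:
--                 present.add(kw)
--     return [sugg for kw, sugg in table if kw in present]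
-- ===== Notes on version B (the rewrite author's own statement) =====
-- stated objective: idiomatic
-- what changed: Replaces four separate any()-scans over risk_factors with a table of (keyword, suggestion) pairs: one pass builds a set of keywords present (lowercasing each factor once), then the table is filtered to produce the suggestions.
import Mathlib
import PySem

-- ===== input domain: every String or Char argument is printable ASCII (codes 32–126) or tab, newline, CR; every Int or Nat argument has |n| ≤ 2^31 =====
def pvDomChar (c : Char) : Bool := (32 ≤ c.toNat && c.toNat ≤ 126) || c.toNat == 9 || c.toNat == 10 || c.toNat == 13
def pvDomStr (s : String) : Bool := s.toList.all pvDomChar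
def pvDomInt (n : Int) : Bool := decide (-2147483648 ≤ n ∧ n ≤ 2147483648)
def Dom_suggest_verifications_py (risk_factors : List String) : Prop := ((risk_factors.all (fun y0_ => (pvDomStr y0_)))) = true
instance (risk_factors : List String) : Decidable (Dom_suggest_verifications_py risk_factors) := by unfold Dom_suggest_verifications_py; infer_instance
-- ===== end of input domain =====

-- B replaces A's four repeated any()-scans by a keyword→suggestion table: one pass collects the
-- keywords present, then the table is filtered (idiomatic; same cost).

-- ===== PORT A =====
def suggest_verifications_py (risk_factors : List String) : List String :=
  let verifications : List String := []
  let verifications := if risk_factors.any (fun factor => PySem.Str.isIn "ownership" (PySem.Str.lower factor))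
    then verifications ++ ["Enhanced ownership verification"] else verifications
  let verifications := if risk_factors.any (fun factor => PySem.Str.isIn "registered" (PySem.Str.lower factor))
    then verifications ++ ["Business registration verification"] else verifications
  let verifications := if risk_factors.any (fun factor => PySem.Str.isIn "industry" (PySem.Str.lower factor))
    then verifications ++ ["Industry-specific compliance checks"] else verifications
  let verifications := if risk_factors.any (fun factor => PySem.Str.isIn "country" (PySem.Str.lower factor))
    then verifications ++ ["Enhanced due diligence for jurisdiction"] else verifications
  verifications

-- ===== PORT B =====
def pvTable : List (String × String) :=
  [("ownership", "Enhanced ownership verification"),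
   ("registered", "Business registration verification"),
   ("industry", "Industry-specific compliance checks"),
   ("country", "Enhanced due diligence for jurisdiction")]

def suggest_verifications_py_alt (risk_factors : List String) : List String :=
  let present : PySem.Set String :=
    risk_factors.foldl (fun present factor =>
      let low := PySem.Str.lower factor
      pvTable.foldl (fun present kv =>
        if PySem.Str.isIn kv.1 low then PySem.Set.add present kv.1 else present) present)
      PySem.Set.empty
  (pvTable.filter (fun kv => PySem.Set.contains present kv.1)).map (fun kv => kv.2)

-- ===== PRECONDITION & SPEC =====
def Spec_suggest_verifications_py (risk_factors : List String) (out : List String) : Prop := out = suggest_verifications_py_alt risk_factors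
instance (risk_factors : List String) (out : List String) : Decidable (Spec_suggest_verifications_py risk_factors out) := by unfold Spec_suggest_verifications_py; infer_instance

-- ===== CLAIM (what is proved, stated in full; the proofs are below) =====
def Claim_equal_suggest_verifications_py : Prop := ∀ (risk_factors : List String), Dom_suggest_verifications_py risk_factors → Spec_suggest_verifications_py risk_factors (suggest_verifications_py risk_factors)

-- ===== LEMMAS AND PROOFS =====

-- membership in the inner (per-factor) fold over the table
theorem mem_inner_fold (s : PySem.Set String) (low : String) (kw : String) :
    kw ∈ pvTable.foldl (fun present kv =>
        if PySem.Str.isIn kv.1 low then PySem.Set.add present kv.1 else present) s ↔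
      kw ∈ s ∨ (kw ∈ pvTable.map Prod.fst ∧ PySem.Str.isIn kw low = true) := by
  simp only [pvTable, List.foldl, List.map]
  split_ifs with h1 h2 h3 h4 <;>
    simp [PySem.Set.mem_add, *] <;> aesop

-- membership in the whole fold over risk_factors
theorem mem_fold (risk_factors : List String) (s : PySem.Set String) (kw : String) :
    kw ∈ risk_factors.foldl (fun present factor =>
        pvTable.foldl (fun present kv =>
          if PySem.Str.isIn kv.1 (PySem.Str.lower factor) then PySem.Set.add present kv.1 else present) present) s ↔
      kw ∈ s ∨ (kw ∈ pvTable.map Prod.fst ∧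
        risk_factors.any (fun factor => PySem.Str.isIn kw (PySem.Str.lower factor)) = true) := by
  induction risk_factors generalizing s with
  | nil => simp
  | cons f t ih =>
    simp only [List.foldl_cons, ih, mem_inner_fold, List.any_cons]
    aesop

theorem contains_fold (risk_factors : List String) (kw : String) (hkw : kw ∈ pvTable.map Prod.fst) :
    PySem.Set.contains
      (risk_factors.foldl (fun present factor =>
        pvTable.foldl (fun present kv =>
          if PySem.Str.isIn kv.1 (PySem.Str.lower factor) then PySem.Set.add present kv.1 else present) present)
        PySem.Set.empty) kw
      = risk_factors.any (fun factor => PySem.Str.isIn kw (PySem.Str.lower factor)) := by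
  rw [Bool.eq_iff_iff, PySem.Set.contains_iff, mem_fold]
  simp [PySem.Set.empty, hkw]

-- ===== VERDICT (by name: the statement is the Claim_ definition above) =====
set_option maxHeartbeats 1000000 in
theorem suggest_verifications_py_spec : Claim_equal_suggest_verifications_py := by
  intro risk_factors _
  unfold Spec_suggest_verifications_py suggest_verifications_py suggest_verifications_py_alt
  have h1 := contains_fold risk_factors "ownership" (by simp [pvTable])
  have h2 := contains_fold risk_factors "registered" (by simp [pvTable])
  have h3 := contains_fold risk_factors "industry" (by simp [pvTable])
  have h4 := contains_fold risk_factors "country" (by simp [pvTable])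
  simp only [pvTable, List.foldl] at h1 h2 h3 h4 ⊢
  simp only [List.filter_cons, List.filter_nil, h1, h2, h3, h4]
  split_ifs <;> rfl
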